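-- pv_equiv track=rewrite | github.com/rianymello/Python-practice | Exercicios-iniciais/bancoFloresta.py | pode_construir_banco
-- ===== SOURCE A (Python) =====
-- def pode_construir_banco(grelha, N, K):
--     for linha in grelha:
--         vazios_consecutivos = 0
--         for char in linha:
--             if char == '.':
--                 vazios_consecutivos += 1
--                 if vazios_consecutivos >= K:
--                     return 1
--             else:
--                 vazios_consecutivos = 0
--     return 0
-- ===== SOURCE B (Python) =====
-- def pode_construir_banco(grelha, N, K):
--     tem = any(
--         any(len(faixa) >= K
--             for faixa in ''.join(c if c == '.' else ' ' for c in linha).split())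
--         for linha in grelha)
--     return 1 if tem else 0
-- ===== Notes on version B (the rewrite author's own statement) =====
-- stated objective: idiomatic
-- what changed: Replaces the running-counter-with-reset scan and early returns by a run decomposition: each row is normalised to dots-and-spaces and split() into maximal dot runs, and any() tests whether some run has length >= K.
import Mathlib
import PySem

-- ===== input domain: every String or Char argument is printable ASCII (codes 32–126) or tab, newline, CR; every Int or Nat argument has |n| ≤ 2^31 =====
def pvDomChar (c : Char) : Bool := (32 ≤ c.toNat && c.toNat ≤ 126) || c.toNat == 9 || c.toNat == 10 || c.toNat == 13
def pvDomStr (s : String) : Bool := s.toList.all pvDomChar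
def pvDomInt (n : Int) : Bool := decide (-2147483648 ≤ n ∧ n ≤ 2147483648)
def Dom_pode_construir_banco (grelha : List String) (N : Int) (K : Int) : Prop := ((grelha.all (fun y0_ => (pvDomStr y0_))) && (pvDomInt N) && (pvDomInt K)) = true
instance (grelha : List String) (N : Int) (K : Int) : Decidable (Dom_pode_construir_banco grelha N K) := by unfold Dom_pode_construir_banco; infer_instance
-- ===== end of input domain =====

-- B replaces A's running-counter scan by a run decomposition (normalise to dots/spaces, split() into
-- maximal dot runs, test run lengths); same cost, more idiomatic.

-- ===== PORT A =====
-- inner 'for char in linha' loop with the running counter and the early 'return 1'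
def pvScanRow (cs : List Char) (vazios : Int) (K : Int) : Bool :=
  match cs with
  | [] => false
  | c :: rest =>
    if c = '.' then
      if vazios + 1 ≥ K then true else pvScanRow rest (vazios + 1) K
    else pvScanRow rest 0 K

def pode_construir_banco (grelha : List String) (N : Int) (K : Int) : Int :=
  match grelha with
  | [] => 0
  | linha :: rest =>
    if pvScanRow linha.toList 0 K then 1 else pode_construir_banco rest N K

-- ===== PORT B =====
-- ''.join(c if c == '.' else ' ' for c in linha).split(), then any(len(faixa) >= K …)
def pvRowOk (linha : String) (K : Int) : Bool :=
  (PySem.Chars.split₀ (linha.toList.map (fun c => if c = '.' then '.' else ' '))).any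
    (fun faixa => decide ((faixa.length : Int) ≥ K))

def pode_construir_banco_alt (grelha : List String) (N : Int) (K : Int) : Int :=
  if grelha.any (fun linha => pvRowOk linha K) then 1 else 0

-- ===== PRECONDITION & SPEC =====
def Spec_pode_construir_banco (grelha : List String) (N : Int) (K : Int) (out : Int) : Prop := out = pode_construir_banco_alt grelha N K
instance (grelha : List String) (N : Int) (K : Int) (out : Int) : Decidable (Spec_pode_construir_banco grelha N K out) := by unfold Spec_pode_construir_banco; infer_instance

-- ===== CLAIM (what is proved, stated in full; the proofs are below) =====
def Claim_equal_pode_construir_banco : Prop := ∀ (grelha : List String) (N : Int) (K : Int), Dom_pode_construir_banco grelha N K → Spec_pode_construir_banco grelha N K (pode_construir_banco grelha N K)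

-- ===== LEMMAS AND PROOFS =====

-- reference form of the per-row result: counter scan without early exit, over the ORIGINAL chars
def pvAux (K : Int) (cs : List Char) (n : Nat) : Bool :=
  match cs with
  | [] => if n = 0 then false else decide (K ≤ (n : Int))
  | c :: rest =>
    if c = '.' then pvAux K rest (n + 1)
    else if n = 0 then pvAux K rest 0
    else (decide (K ≤ (n : Int)) || pvAux K rest 0)

theorem pvAux_of_ge (K : Int) (cs : List Char) (n : Nat) (h1 : 1 ≤ n) (h2 : K ≤ (n : Int)) :
    pvAux K cs n = true := by
  induction cs generalizing n with
  | nil => simp [pvAux, h2]; omega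
  | cons c rest ih =>
    by_cases hc : c = '.'
    · simpa [pvAux, hc] using ih (n + 1) (by omega) (by push_cast; omega)
    · simp [pvAux, hc, h2]; omega

theorem pvScanRow_eq_pvAux (K : Int) (cs : List Char) (n : Nat)
    (h : (n : Int) < K ∨ n = 0) : pvScanRow cs (n : Int) K = pvAux K cs n := by
  induction cs generalizing n with
  | nil =>
    rcases h with h | h
    · simp [pvScanRow, pvAux]; intro _; omega
    · simp [pvScanRow, pvAux, h]
  | cons c rest ih =>
    by_cases hc : c = '.'
    · by_cases hK : (n : Int) + 1 ≥ K
      · have : pvAux K rest (n + 1) = true :=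
          pvAux_of_ge K rest (n + 1) (by omega) (by push_cast; omega)
        simp [pvScanRow, pvAux, hc, hK, this]
      · have := ih (n + 1) (Or.inl (by push_cast at hK ⊢; omega))
        push_cast at this
        simp [pvScanRow, pvAux, hc, hK, this]
    · have := ih 0 (Or.inr rfl)
      rcases h with h | h
      · have hKn : ¬ K ≤ (n : Int) := by omega
        simp [pvScanRow, pvAux, hc, hKn]
        exact this
      · simp [pvScanRow, pvAux, hc, h]
        exact this

theorem pvGo_any (K : Int) (cs cur : List Char) (acc : List (List Char)) :
    ((PySem.Chars.split₀.go (cs.map (fun c => if c = '.' then '.' else ' ')) cur acc).any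
        (fun faixa => decide ((faixa.length : Int) ≥ K)))
      = (acc.any (fun faixa => decide ((faixa.length : Int) ≥ K)) || pvAux K cs cur.length) := by
  induction cs generalizing cur acc with
  | nil =>
    by_cases hcur : cur = []
    · simp [PySem.Chars.split₀.go, hcur, pvAux]
    · have : cur.isEmpty = false := by simpa [List.isEmpty_iff] using hcur
      have hn : cur.length ≠ 0 := by simpa [List.length_eq_zero_iff] using hcur
      simp [PySem.Chars.split₀.go, this, pvAux, hn, List.any_reverse, ge_iff_le, Bool.or_comm]
  | cons c rest ih =>
    by_cases hc : c = '.'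
    · have hs : PySem.Chars.isspace '.' = false := by decide
      simpa [PySem.Chars.split₀.go, hc, hs, pvAux] using ih ('.' :: cur) acc
    · have hs : PySem.Chars.isspace ' ' = true := by decide
      by_cases hcur : cur = []
      · simpa [PySem.Chars.split₀.go, hc, hs, hcur, pvAux] using ih [] acc
      · have hne : cur.isEmpty = false := by simpa [List.isEmpty_iff] using hcur
        have hn : cur.length ≠ 0 := by simpa [List.length_eq_zero_iff] using hcur
        have := ih [] (cur.reverse :: acc)
        simp [PySem.Chars.split₀.go, hc, hs, hne, pvAux, hn] at this ⊢
        rw [this]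
        simp [Bool.or_comm, Bool.or_assoc, Bool.or_left_comm]

theorem pvRow_eq (linha : String) (K : Int) :
    pvScanRow linha.toList 0 K = pvRowOk linha K := by
  have h1 : pvScanRow linha.toList 0 K = pvAux K linha.toList 0 := by
    simpa using pvScanRow_eq_pvAux K linha.toList 0 (Or.inr rfl)
  rw [pvRowOk, PySem.Chars.split₀, pvGo_any]
  simp [h1]

theorem pode_construir_banco_spec : Claim_equal_pode_construir_banco := by
  intro grelha N K hd
  clear hd
  show pode_construir_banco grelha N K = pode_construir_banco_alt grelha N K
  induction grelha with
  | nil => simp [pode_construir_banco, pode_construir_banco_alt]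
  | cons linha rest ih =>
    rw [pode_construir_banco, pode_construir_banco_alt]
    by_cases h : pvScanRow linha.toList 0 K = true
    · simp [h, ← pvRow_eq]
    · rw [ih, pode_construir_banco_alt]
      simp [← pvRow_eq, h]
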